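-- pv_equiv track=rewrite | github.com/tezheng/ModelInsider | modelexport/strategies/htp/htp_exporter.py | _group_operations_by_type
-- ===== SOURCE A (Python) =====
-- def _group_operations_by_type(
--     module_nodes: list[str], node_info_map: dict
-- ) -> dict[str, list[str]]:
--     """Group ONNX operations by their operation type."""
--     from collections import defaultdict
--
--     ops_by_type = defaultdict(list)
--     for node_name in module_nodes:
--         if node_name in node_info_map:
--             op_type = node_info_map[node_name]["op_type"]
--             ops_by_type[op_type].append(node_name)
--     return dict(ops_by_type)
-- ===== SOURCE B (Python) =====
-- def _group_operations_by_type(module_nodes, node_info_map):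
--     """Group ONNX operations by their operation type."""
--     pairs = [(node_info_map[n]["op_type"], n) for n in module_nodes if n in node_info_map]
--     types = list(dict.fromkeys(t for t, _ in pairs))
--     return {t: [n for tt, n in pairs if tt == t] for t in types}
-- ===== Notes on version B (the rewrite author's own statement) =====
-- stated objective: alternative
-- what changed: Replaces A's single accumulating defaultdict loop with a filtered (op_type, node) pair list, first-occurrence-ordered distinct op_types via dict.fromkeys, and a per-type comprehension scan to collect each group.
import Mathlib
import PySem

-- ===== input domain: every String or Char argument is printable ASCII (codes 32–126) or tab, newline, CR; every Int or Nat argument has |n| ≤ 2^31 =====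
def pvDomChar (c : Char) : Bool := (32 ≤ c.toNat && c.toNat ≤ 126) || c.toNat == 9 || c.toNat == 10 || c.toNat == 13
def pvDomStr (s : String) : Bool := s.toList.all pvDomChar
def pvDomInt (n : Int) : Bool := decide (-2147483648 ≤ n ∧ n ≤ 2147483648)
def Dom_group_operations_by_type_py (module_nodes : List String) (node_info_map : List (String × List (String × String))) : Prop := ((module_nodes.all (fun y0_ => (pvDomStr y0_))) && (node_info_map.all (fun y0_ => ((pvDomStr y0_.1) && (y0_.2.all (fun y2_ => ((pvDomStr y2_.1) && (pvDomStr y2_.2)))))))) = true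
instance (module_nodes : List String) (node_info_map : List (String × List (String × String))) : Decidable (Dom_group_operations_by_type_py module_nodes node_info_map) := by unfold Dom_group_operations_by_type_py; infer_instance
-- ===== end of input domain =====

-- B groups by building the filtered (op_type, node) pair list once, then taking the
-- first-occurrence-ordered distinct op_types and collecting each group by a per-type scan,
-- instead of A's single accumulating defaultdict pass (objective: alternative).


-- ===== PORT A =====
-- for node_name in module_nodes: if node_name in node_info_map:
--   ops_by_type[node_info_map[node_name]["op_type"]].append(node_name)   (defaultdict(list))
-- Python raises KeyError when an info dict lacks "op_type"; those inputs are outside Pre_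
-- (the port uses getD with "" there, which Pre_ makes unreachable).
def group_operations_by_type_py (module_nodes : List String) (node_info_map : List (String × List (String × String))) : List (String × List String) :=
  (module_nodes.foldl
    (fun (d : PySem.Dict String (List String)) n =>
      match (PySem.Dict.mk node_info_map).get? n with
      | none => d
      | some info => d.modify ((PySem.Dict.mk info).getD "op_type" "") [] (· ++ [n]))
    PySem.Dict.empty).items

-- ===== PORT B =====
-- pairs = [(node_info_map[n]["op_type"], n) for n in module_nodes if n in node_info_map]
-- types = list(dict.fromkeys(t for t, _ in pairs))
-- {t: [n for tt, n in pairs if tt == t] for t in types}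
def group_operations_by_type_py_alt (module_nodes : List String) (node_info_map : List (String × List (String × String))) : List (String × List String) :=
  let pairs : List (String × String) := module_nodes.filterMap
    (fun n =>
      match (PySem.Dict.mk node_info_map).get? n with
      | none => none
      | some info => some ((PySem.Dict.mk info).getD "op_type" "", n))
  let types : List String := PySem.Set.ofList (pairs.map (·.1))
  types.map (fun t => (t, (pairs.filter (fun p => p.1 == t)).map (·.2)))

-- ===== PRECONDITION & SPEC =====
-- Pre_ excludes exactly the inputs where Python A raises KeyError: some node of
-- module_nodes is found in node_info_map but its info dict has no "op_type" key.
def Pre_group_operations_by_type_py (module_nodes : List String) (node_info_map : List (String × List (String × String))) : Prop :=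
  (module_nodes.all (fun n =>
    match (PySem.Dict.mk node_info_map).get? n with
    | none => true
    | some info => (PySem.Dict.mk info).contains "op_type")) = true
instance (module_nodes : List String) (node_info_map : List (String × List (String × String))) : Decidable (Pre_group_operations_by_type_py module_nodes node_info_map) := by unfold Pre_group_operations_by_type_py; infer_instance

def pvWitness_group_operations_by_type_py : List String × (List (String × List (String × String))) :=
  (["a", "b", "a"], [("a", [("op_type", "Conv")]), ("b", [("op_type", "Relu")])])

def Spec_group_operations_by_type_py (module_nodes : List String) (node_info_map : List (String × List (String × String))) (out : List (String × List String)) : Prop := out = group_operations_by_type_py_alt module_nodes node_info_map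
instance (module_nodes : List String) (node_info_map : List (String × List (String × String))) (out : List (String × List String)) : Decidable (Spec_group_operations_by_type_py module_nodes node_info_map out) := by unfold Spec_group_operations_by_type_py; infer_instance

-- ===== CLAIM (what is proved, stated in full; the proofs are below) =====
def Claim_equal_group_operations_by_type_py : Prop := ∀ (module_nodes : List String) (node_info_map : List (String × List (String × String))), Dom_group_operations_by_type_py module_nodes node_info_map → Pre_group_operations_by_type_py module_nodes node_info_map → Spec_group_operations_by_type_py module_nodes node_info_map (group_operations_by_type_py module_nodes node_info_map)

-- ===== LEMMAS AND PROOFS =====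

-- A's loop over module_nodes is the grouping loop over B's filtered pair list.
theorem pvFoldl_eq_pairs (module_nodes : List String) (node_info_map : List (String × List (String × String))) (d : PySem.Dict String (List String)) :
    module_nodes.foldl
      (fun (d : PySem.Dict String (List String)) n =>
        match (PySem.Dict.mk node_info_map).get? n with
        | none => d
        | some info => d.modify ((PySem.Dict.mk info).getD "op_type" "") [] (· ++ [n]))
      d
    = (module_nodes.filterMap
        (fun n =>
          match (PySem.Dict.mk node_info_map).get? n with
          | none => none
          | some info => some ((PySem.Dict.mk info).getD "op_type" "", n))).foldl
        (fun (d : PySem.Dict String (List String)) p => d.modify p.1 [] (· ++ [p.2])) d := by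
  induction module_nodes generalizing d with
  | nil => rfl
  | cons n rest ih =>
    simp only [List.foldl_cons, List.filterMap_cons]
    cases h : (PySem.Dict.mk node_info_map).get? n with
    | none => exact ih d
    | some info => simp only [List.foldl_cons]; exact ih _

-- The grouping loop's items are the first-occurrence keys paired with per-key filters.
theorem pvGroup_items (L : List (String × String)) :
    (L.foldl (fun (d : PySem.Dict String (List String)) p => d.modify p.1 [] (· ++ [p.2]))
      PySem.Dict.empty).items
    = (PySem.Set.ofList (L.map (·.1))).map
        (fun t => (t, (L.filter (fun p => p.1 == t)).map (·.2))) := by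
  set d := L.foldl (fun (d : PySem.Dict String (List String)) p => d.modify p.1 [] (· ++ [p.2]))
      PySem.Dict.empty with hd
  have hkeys : d.keys = PySem.Set.ofList (L.map (·.1)) := by
    rw [hd, PySem.Dict.keys_foldl_modify_key]
    simp [PySem.Dict.keys_empty, PySem.Set.update_nil_left]
  have hnd : d.keys.Nodup := by rw [hkeys]; exact PySem.Set.nodup_ofList _
  rw [PySem.Dict.items_eq_map_keys d hnd ([] : List String), hkeys]
  apply List.map_congr_left
  intro t _
  have := PySem.Dict.getD_foldl_modify_append L PySem.Dict.empty t
  rw [hd, this]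
  simp [PySem.Dict.getD_empty]

-- ===== VERDICT (by name: the statement is the Claim_ definition above) =====
theorem group_operations_by_type_py_spec : Claim_equal_group_operations_by_type_py := by
  intro module_nodes node_info_map _ _
  unfold Spec_group_operations_by_type_py group_operations_by_type_py group_operations_by_type_py_alt
  rw [pvFoldl_eq_pairs, pvGroup_items]
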